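-- pv_equiv track=rewrite | github.com/bashbash96/InterviewPreparation | LeetCode/medium.py | count_sub_mat
-- ===== SOURCE A (Python) =====
-- def count_sub_mat(heights):
--     sum_ = [0] * len(heights)
--     stack = []
--
--     res = 0
--     for i, val in enumerate(heights):
--
--         while stack and heights[stack[-1]] >= val:
--             stack.pop()
--
--         if stack:
--             prev_idx = stack[-1]
--             sum_[i] = sum_[prev_idx] + (val * (i - prev_idx))
--         else:
--             sum_[i] = val * (i + 1)
--
--         res += sum_[i]
--         stack.append(i)
--
--     return res
-- ===== SOURCE B (Python) =====
-- def count_sub_mat(heights):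
--     res = 0
--     for i in range(len(heights)):
--         minv = heights[i]
--         res += minv
--         for j in range(i - 1, -1, -1):
--             minv = min(minv, heights[j])
--             res += minv
--     return res
-- ===== Notes on version B (the rewrite author's own statement) =====
-- stated objective: simpler
-- what changed: Replaces the monotonic stack and sum_ array with a plain double loop that, for each i, scans backward accumulating the running minimum of heights[j..i] and adds it to the result.
import Mathlib
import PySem

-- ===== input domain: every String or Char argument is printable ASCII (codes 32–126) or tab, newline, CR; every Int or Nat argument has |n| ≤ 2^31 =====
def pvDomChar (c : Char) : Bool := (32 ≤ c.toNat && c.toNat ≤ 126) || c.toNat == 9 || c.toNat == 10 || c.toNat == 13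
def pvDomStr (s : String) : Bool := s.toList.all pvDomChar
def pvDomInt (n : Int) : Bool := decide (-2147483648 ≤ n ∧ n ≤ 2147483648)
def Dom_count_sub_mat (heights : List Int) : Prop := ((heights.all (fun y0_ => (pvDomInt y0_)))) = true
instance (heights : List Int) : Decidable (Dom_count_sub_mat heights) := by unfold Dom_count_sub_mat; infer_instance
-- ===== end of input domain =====

-- B replaces A's monotonic-stack recurrence by a plain double loop over backward
-- running minima (simpler, but O(n^2) instead of A's O(n)).

-- ===== PORT A =====
-- the 'while stack and heights[stack[-1]] >= val: stack.pop()' loop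
def pvPopA (h : List Int) (val : Int) : List Int → List Int
  | [] => []
  | t :: rest => if val ≤ PySem.List.pyGetD h t 0 then pvPopA h val rest else t :: rest

-- one iteration of A's for-loop; the stack keeps its top at the head
def pvStepA (h : List Int) (st : List Int × List Int × Int) (p : Int × Int) :
    List Int × List Int × Int :=
  let sum_ := st.1
  let res := st.2.2
  let i := p.1
  let val := p.2
  let stack := pvPopA h val st.2.1
  let s : Int :=
    match stack with
    | prev :: _ => PySem.List.pyGetD sum_ prev 0 + val * (i - prev)
    | [] => val * (i + 1)
  (PySem.List.pySetD sum_ i s, i :: stack, res + s)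

def count_sub_mat (heights : List Int) : Int :=
  ((PySem.List.enumerate heights 0).foldl (pvStepA heights)
    (List.replicate heights.length 0, ([] : List Int), 0)).2.2

-- ===== PORT B =====
-- inner loop 'for j in range(i-1,-1,-1): minv = min(minv, heights[j]); res += minv'
-- (j is a nonnegative loop counter, so Nat recursion/getD is exact here)
def pvInnerB (h : List Int) : Nat → Int → Int → Int
  | 0, _, res => res
  | j + 1, minv, res =>
    let m := min minv (h.getD j 0)
    pvInnerB h j m (res + m)

def count_sub_mat_alt (heights : List Int) : Int :=
  (List.range heights.length).foldl
    (fun res i =>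
      let minv := heights.getD i 0
      pvInnerB heights i minv (res + minv)) 0

-- ===== PRECONDITION & SPEC =====
def Spec_count_sub_mat (heights : List Int) (out : Int) : Prop := out = count_sub_mat_alt heights
instance (heights : List Int) (out : Int) : Decidable (Spec_count_sub_mat heights out) := by unfold Spec_count_sub_mat; infer_instance

-- ===== CLAIM (what is proved, stated in full; the proofs are below) =====
def Claim_equal_count_sub_mat : Prop := ∀ (heights : List Int), Dom_count_sub_mat heights → Spec_count_sub_mat heights (count_sub_mat heights)

-- ===== LEMMAS AND PROOFS =====
-- the pure value of B's inner loop (no res threading)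
def pvInner (h : List Int) : Nat → Int → Int
  | 0, _ => 0
  | j + 1, minv =>
    let m := min minv (h.getD j 0)
    m + pvInner h j m

-- S(i) = Σ_{j ≤ i} min(heights[j..i]) : B's contribution of row i
def pvG (h : List Int) (i : Nat) : Int := h.getD i 0 + pvInner h i (h.getD i 0)

lemma pvInnerB_eq (h : List Int) : ∀ (j : Nat) (m res : Int),
    pvInnerB h j m res = res + pvInner h j m := by
  intro j
  induction j with
  | zero => intro m res; simp only [pvInnerB, pvInner]; ring
  | succ j ih => intro m res; simp only [pvInnerB, pvInner]; rw [ih]; ring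

lemma pvInner_const (h : List Int) : ∀ (j : Nat) (m : Int),
    (∀ t : Nat, t < j → m ≤ h.getD t 0) → pvInner h j m = m * j := by
  intro j
  induction j with
  | zero => intro m _; simp [pvInner]
  | succ j ih =>
    intro m hm
    have h1 : m ≤ h.getD j 0 := hm j (by omega)
    have h2 : ∀ t : Nat, t < j → m ≤ h.getD t 0 := fun t ht => hm t (by omega)
    simp only [pvInner]
    rw [min_eq_left h1, ih m h2]
    push_cast; ring

lemma pvInner_split (h : List Int) : ∀ (j p : Nat) (m : Int), p < j →
    h.getD p 0 < m → (∀ t : Nat, p < t → t < j → m ≤ h.getD t 0) →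
    pvInner h j m = m * ((j : Int) - p - 1) + pvG h p := by
  intro j
  induction j with
  | zero => intro p m hp; omega
  | succ j ih =>
    intro p m hp hlt hmid
    by_cases hpj : p = j
    · subst hpj
      simp only [pvInner, pvG]
      rw [min_eq_right (le_of_lt hlt)]
      push_cast; ring
    · have hpj' : p < j := by omega
      have hj : m ≤ h.getD j 0 := hmid j (by omega) (by omega)
      have hmid' : ∀ t : Nat, p < t → t < j → m ≤ h.getD t 0 :=
        fun t h1 h2 => hmid t h1 (by omega)
      simp only [pvInner]
      rw [min_eq_left hj, ih p m hpj' hlt hmid']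
      push_cast; ring

lemma pvG_base (h : List Int) (i : Nat)
    (hall : ∀ t : Nat, t < i → h.getD i 0 ≤ h.getD t 0) :
    pvG h i = h.getD i 0 * ((i : Int) + 1) := by
  simp only [pvG]
  rw [pvInner_const h i _ hall]
  ring

lemma pvG_step (h : List Int) (i p : Nat) (hp : p < i)
    (hlt : h.getD p 0 < h.getD i 0)
    (hmid : ∀ t : Nat, p < t → t < i → h.getD i 0 ≤ h.getD t 0) :
    pvG h i = pvG h p + h.getD i 0 * ((i : Int) - p) := by
  have hsp := pvInner_split h i p (h.getD i 0) hp hlt hmid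
  simp only [pvG] at hsp ⊢
  rw [hsp]
  ring

-- pop lemmas ------------------------------------------------------------

lemma pvPopA_suffix (h : List Int) (val : Int) :
    ∀ s : List Int, pvPopA h val s <:+ s := by
  intro s
  induction s with
  | nil => simp [pvPopA]
  | cons t rest ih =>
    by_cases hc : val ≤ PySem.List.pyGetD h t 0
    · simp only [pvPopA, if_pos hc]
      exact ih.trans (List.suffix_cons t rest)
    · simp [pvPopA, if_neg hc]

lemma pvPopA_mem (h : List Int) (val : Int) :
    ∀ s : List Int, s.Pairwise (· > ·) →
    (∀ x y, x ∈ s → y ∈ s → x < y →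
      PySem.List.pyGetD h x 0 < PySem.List.pyGetD h y 0) →
    ∀ j, j ∈ pvPopA h val s ↔ (j ∈ s ∧ PySem.List.pyGetD h j 0 < val) := by
  intro s
  induction s with
  | nil => simp [pvPopA]
  | cons t rest ih =>
    intro hpw hmono j
    have hpw' : rest.Pairwise (· > ·) := (List.pairwise_cons.mp hpw).2
    have htr : ∀ x ∈ rest, x < t := (List.pairwise_cons.mp hpw).1
    by_cases hc : val ≤ PySem.List.pyGetD h t 0
    · simp only [pvPopA, if_pos hc]
      rw [ih hpw' (fun x y hx hy => hmono x y (List.mem_cons_of_mem _ hx) (List.mem_cons_of_mem _ hy))]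
      constructor
      · rintro ⟨hj, hlt⟩; exact ⟨List.mem_cons_of_mem _ hj, hlt⟩
      · rintro ⟨hj, hlt⟩
        rcases List.mem_cons.mp hj with rfl | hj
        · omega
        · exact ⟨hj, hlt⟩
    · simp only [pvPopA, if_neg hc]
      constructor
      · intro hj
        refine ⟨hj, ?_⟩
        rcases List.mem_cons.mp hj with rfl | hj'
        · omega
        · have := hmono j t (List.mem_cons_of_mem _ hj') List.mem_cons_self (htr j hj')
          omega
      · exact fun hh => hh.1

-- A's loop invariant ----------------------------------------------------

def pvInv (h : List Int) (i : Nat) (st : List Int × List Int × Int) : Prop :=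
  st.1.length = h.length ∧
  st.2.1.Pairwise (· > ·) ∧
  (∀ j : Int, j ∈ st.2.1 ↔ (0 ≤ j ∧ j < (i : Int) ∧
      ∀ m : Int, j < m → m < (i : Int) →
        PySem.List.pyGetD h j 0 < PySem.List.pyGetD h m 0)) ∧
  (∀ j : Int, j ∈ st.2.1 → PySem.List.pyGetD st.1 j 0 = pvG h j.toNat) ∧
  st.2.2 = (List.range i).foldl (fun r t => r + pvG h t) 0

lemma pvStepA_inv (h : List Int) (i : Nat) (hi : i < h.length)
    (st : List Int × List Int × Int) (hinv : pvInv h i st) :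
    pvInv h (i + 1) (pvStepA h st ((i : Int), h.getD i 0)) := by
  obtain ⟨hlen, hpw, hmem, hsum, hres⟩ := hinv
  set val : Int := h.getD i 0 with hval
  have hHi : PySem.List.pyGetD h (i : Int) 0 = val := by
    rw [PySem.List.pyGetD_natCast]
  -- monotonicity of heights along the stack
  have hmono : ∀ x y, x ∈ st.2.1 → y ∈ st.2.1 → x < y →
      PySem.List.pyGetD h x 0 < PySem.List.pyGetD h y 0 := by
    intro x y hx hy hxy
    obtain ⟨_, _, hxall⟩ := (hmem x).mp hx
    obtain ⟨_, hyi, _⟩ := (hmem y).mp hy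
    exact hxall y hxy hyi
  have hpopmem := pvPopA_mem h val st.2.1 hpw hmono
  have hpops : pvPopA h val st.2.1 <:+ st.2.1 := pvPopA_suffix h val st.2.1
  have hpopw : (pvPopA h val st.2.1).Pairwise (· > ·) := hpw.sublist hpops.sublist
  -- characterization of the popped stack
  have hpop' : ∀ j : Int, j ∈ pvPopA h val st.2.1 ↔
      (0 ≤ j ∧ j < (i : Int) ∧
        (∀ m : Int, j < m → m < (i : Int) →
          PySem.List.pyGetD h j 0 < PySem.List.pyGetD h m 0) ∧
        PySem.List.pyGetD h j 0 < val) := by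
    intro j
    rw [hpopmem j, hmem j]; tauto
  -- the value A stores at index i equals pvG h i
  have hs_eq : (match pvPopA h val st.2.1 with
      | prev :: _ => PySem.List.pyGetD st.1 prev 0 + val * ((i : Int) - prev)
      | [] => val * ((i : Int) + 1)) = pvG h i := by
    cases hstk : pvPopA h val st.2.1 with
    | nil =>
      -- no previous smaller element: val ≤ every earlier height
      have hall : ∀ t : Nat, t < i → h.getD i 0 ≤ h.getD t 0 := by
        intro t ht
        by_contra hcon
        push Not at hcon
        have hex := Nat.findGreatest_spec
          (P := fun m => m < i ∧ h.getD m 0 < val) (m := t) (n := i)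
          (by omega) ⟨ht, hcon⟩
        set m0 := Nat.findGreatest (fun m => m < i ∧ h.getD m 0 < val) i with hm0
        have hmax : ∀ m : Nat, m0 < m → m < i → val ≤ h.getD m 0 := by
          intro m hm hmi
          by_contra hc2
          push Not at hc2
          exact Nat.findGreatest_is_greatest hm (by omega) ⟨hmi, hc2⟩
        have hmm : (m0 : Int) ∈ pvPopA h val st.2.1 := by
          rw [hpop' _]
          refine ⟨by omega, by exact_mod_cast hex.1, ?_, ?_⟩
          · intro m hm1 hm2
            have hmle : val ≤ h.getD m.toNat 0 := hmax m.toNat (by omega) (by omega)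
            have e1 : PySem.List.pyGetD h (m0 : Int) 0 = h.getD m0 0 :=
              PySem.List.pyGetD_natCast ..
            have e2 : PySem.List.pyGetD h m 0 = h.getD m.toNat 0 := by
              rw [show m = ((m.toNat : Nat) : Int) by omega]
              exact PySem.List.pyGetD_natCast ..
            rw [e1, e2]
            exact lt_of_lt_of_le hex.2 hmle
          · rw [PySem.List.pyGetD_natCast]
            exact hex.2
        rw [hstk] at hmm
        simp at hmm
      show val * ((i : Int) + 1) = pvG h i
      rw [pvG_base h i hall, hval]
    | cons prev tail =>
      have hprev : prev ∈ pvPopA h val st.2.1 := by rw [hstk]; exact List.mem_cons_self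
      obtain ⟨hp0, hpi, hpall, hplt⟩ := (hpop' prev).mp hprev
      -- prev is the largest index on the popped stack
      have hmaxstk : ∀ x ∈ tail, x < prev :=
        (List.pairwise_cons.mp (hstk ▸ hpopw)).1
      -- maximality: no index strictly between prev and i has height < val
      have hmid : ∀ t : Nat, prev.toNat < t → t < i → val ≤ h.getD t 0 := by
        intro t ht1 ht2
        by_contra hc
        push Not at hc
        have hex := Nat.findGreatest_spec
          (P := fun m => prev.toNat < m ∧ m < i ∧ h.getD m 0 < val) (m := t) (n := i)
          (by omega) ⟨ht1, ht2, hc⟩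
        set m0 := Nat.findGreatest (fun m => prev.toNat < m ∧ m < i ∧ h.getD m 0 < val) i with hm0
        have hmax : ∀ m : Nat, m0 < m → m < i → val ≤ h.getD m 0 := by
          intro m hm hmi
          by_contra hc2
          push Not at hc2
          exact Nat.findGreatest_is_greatest hm (by omega) ⟨by omega, hmi, hc2⟩
        have hm0mem : (m0 : Int) ∈ pvPopA h val st.2.1 := by
          rw [hpop' _]
          refine ⟨by omega, by exact_mod_cast hex.2.1, ?_, ?_⟩
          · intro m hm1 hm2
            have hmle : val ≤ h.getD m.toNat 0 := hmax m.toNat (by omega) (by omega)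
            have e1 : PySem.List.pyGetD h (m0 : Int) 0 = h.getD m0 0 :=
              PySem.List.pyGetD_natCast ..
            have e2 : PySem.List.pyGetD h m 0 = h.getD m.toNat 0 := by
              rw [show m = ((m.toNat : Nat) : Int) by omega]
              exact PySem.List.pyGetD_natCast ..
            rw [e1, e2]
            exact lt_of_lt_of_le hex.2.2 hmle
          · rw [PySem.List.pyGetD_natCast]
            exact hex.2.2
        rw [hstk] at hm0mem
        rcases List.mem_cons.mp hm0mem with heq | hmem'
        · omega
        · have := hmaxstk _ hmem'; omega
      -- apply the recurrence for pvG
      have hplt' : h.getD prev.toNat 0 < h.getD i 0 := by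
        have e : PySem.List.pyGetD h prev 0 = h.getD prev.toNat 0 := by
          rw [show prev = ((prev.toNat : Nat) : Int) by omega]
          exact PySem.List.pyGetD_natCast ..
        rw [e] at hplt
        exact hplt
      have hgs : pvG h i = pvG h prev.toNat + h.getD i 0 * ((i : Int) - prev.toNat) :=
        pvG_step h i prev.toNat (by omega) hplt' hmid
      have hsum' : PySem.List.pyGetD st.1 prev 0 = pvG h prev.toNat :=
        hsum prev (hpops.sublist.subset hprev)
      show PySem.List.pyGetD st.1 prev 0 + val * ((i : Int) - prev) = pvG h i
      rw [hsum', hgs, show ((prev.toNat : Nat) : Int) = prev by omega, hval]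
  -- unfold one step of A
  have hstep : pvStepA h st ((i : Int), val) =
      (PySem.List.pySetD st.1 (i : Int)
        (match pvPopA h val st.2.1 with
          | prev :: _ => PySem.List.pyGetD st.1 prev 0 + val * ((i : Int) - prev)
          | [] => val * ((i : Int) + 1)),
       (i : Int) :: pvPopA h val st.2.1,
       st.2.2 +
        (match pvPopA h val st.2.1 with
          | prev :: _ => PySem.List.pyGetD st.1 prev 0 + val * ((i : Int) - prev)
          | [] => val * ((i : Int) + 1))) := rfl
  rw [hstep, hs_eq]
  -- now establish each component of the invariant at i+1
  refine ⟨?_, ?_, ?_, ?_, ?_⟩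
  · -- length
    show (PySem.List.pySetD st.1 (i : Int) (pvG h i)).length = h.length
    rw [PySem.List.pySetD_natCast]
    simp [hlen]
  · -- pairwise
    show ((i : Int) :: pvPopA h val st.2.1).Pairwise (· > ·)
    refine List.pairwise_cons.mpr ⟨?_, hpopw⟩
    intro x hx
    obtain ⟨_, hxi, _⟩ := (hpop' x).mp hx
    omega
  · -- membership characterization at i+1
    intro j
    show j ∈ (i : Int) :: pvPopA h val st.2.1 ↔ _
    constructor
    · intro hj
      rcases List.mem_cons.mp hj with rfl | hj'
      · refine ⟨by omega, by omega, ?_⟩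
        intro m hm1 hm2; omega
      · obtain ⟨hj0, hji, hjall, hjlt⟩ := (hpop' j).mp hj'
        refine ⟨hj0, by omega, ?_⟩
        intro m hm1 hm2
        by_cases hmi : m = (i : Int)
        · subst hmi; rw [hHi]; exact hjlt
        · exact hjall m hm1 (by omega)
    · rintro ⟨hj0, hji, hjall⟩
      by_cases hjei : j = (i : Int)
      · subst hjei; exact List.mem_cons_self
      · refine List.mem_cons_of_mem _ ?_
        rw [hpop' j]
        refine ⟨hj0, by omega, ?_, ?_⟩
        · intro m hm1 hm2; exact hjall m hm1 (by omega)
        · have := hjall (i : Int) (by omega) (by omega)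
          rw [hHi] at this; exact this
  · -- stored sums
    intro j hj
    have hjc : j ∈ (i : Int) :: pvPopA h val st.2.1 := hj
    show PySem.List.pyGetD (PySem.List.pySetD st.1 (i : Int) (pvG h i)) j 0 = pvG h j.toNat
    rw [PySem.List.pySetD_natCast]
    rcases List.mem_cons.mp hjc with rfl | hj'
    · rw [PySem.List.pyGetD_natCast]
      rw [List.getD_eq_getElem?_getD, List.getElem?_set_self (by omega : i < st.1.length)]
      simp
    · obtain ⟨hj0, hji, _, _⟩ := (hpop' j).mp hj'
      have hx := hsum j (hpops.sublist.subset hj')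
      rw [show j = ((j.toNat : Nat) : Int) by omega] at hx ⊢
      rw [PySem.List.pyGetD_natCast] at hx ⊢
      rw [List.getD_eq_getElem?_getD, List.getElem?_set_ne (by omega : i ≠ j.toNat),
        ← List.getD_eq_getElem?_getD]
      exact hx
  · -- res accumulates pvG
    show st.2.2 + pvG h i = (List.range (i + 1)).foldl (fun r t => r + pvG h t) 0
    rw [List.range_succ, List.foldl_append, ← hres]
    simp

-- A's fold over the range establishes the invariant
lemma pvA_fold (h : List Int) : ∀ i : Nat, i ≤ h.length →
    pvInv h i ((List.range i).foldl
      (fun st (k : Nat) => pvStepA h st ((k : Int), h.getD k 0))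
      (List.replicate h.length 0, ([] : List Int), 0)) := by
  intro i
  induction i with
  | zero =>
    intro _
    refine ⟨by simp, by simp, ?_, by simp, by simp⟩
    intro j; simp; omega
  | succ i ih =>
    intro hle
    rw [List.range_succ, List.foldl_append]
    simp only [List.foldl_cons, List.foldl_nil]
    exact pvStepA_inv h i (by omega) _ (ih (by omega))

-- A's fold over enumerate is the fold over range
lemma pvA_enum (h : List Int) :
    (PySem.List.enumerate h 0).foldl (pvStepA h)
      (List.replicate h.length 0, ([] : List Int), 0) =
    (List.range h.length).foldl
      (fun st (k : Nat) => pvStepA h st ((k : Int), h.getD k 0))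
      (List.replicate h.length 0, ([] : List Int), 0) := by
  rw [PySem.List.enumerate_eq_map_pyRange (d := 0)]
  simp only [PySem.List.len_eq]
  rw [PySem.List.pyRange_zero_nat, List.map_map, List.foldl_map]
  simp only [Function.comp_def, PySem.List.pyGetD_natCast]

-- ===== VERDICT (by name: the statement is the Claim_ definition above) =====
theorem count_sub_mat_spec : Claim_equal_count_sub_mat := by
  intro heights _
  unfold Spec_count_sub_mat count_sub_mat count_sub_mat_alt
  have hfun : (fun (res : Int) (i : Nat) =>
      let minv := heights.getD i 0
      pvInnerB heights i minv (res + minv)) = (fun r t => r + pvG heights t) := by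
    funext r t
    simp only [pvInnerB_eq, pvG]
    ring
  rw [pvA_enum, hfun]
  exact (pvA_fold heights heights.length le_rfl).2.2.2.2
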